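-- pv_equiv track=rewrite | github.com/Hulyamr13/hackerrank | Project Euler 168.py | search
-- ===== SOURCE A (Python) =====
-- def search(num_digits, multiplier, last_digit, modulo):
--     shift = 10
--     carry = 0
--     current = last_digit
--     result = last_digit
--
--     while num_digits > 1:
--         next_digit = multiplier * current + carry
--         carry = next_digit // 10
--         current = next_digit % 10
--
--         if shift < modulo:
--             result += current * shift
--             shift *= 10
--
--         num_digits -= 1
--
--     first_digit = multiplier * current + carry
--
--     if current == 0 or first_digit != last_digit:
--         return 0
--
--     return result
-- ===== SOURCE B (Python) =====
-- def search(num_digits, multiplier, last_digit, modulo):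
--     # Phase 1: only the first few steps (while shift < modulo) contribute to
--     # result; accumulate them directly.
--     shift = 10
--     carry = 0
--     current = last_digit
--     result = last_digit
--     n = num_digits - 1  # steps remaining
--     while n > 0 and shift < modulo:
--         nd = multiplier * current + carry
--         carry = nd // 10
--         current = nd % 10
--         result += current * shift
--         shift *= 10
--         n -= 1
--     # Phase 2: the remaining n steps only evolve (current, carry); jump ahead
--     # with cycle detection on that state.
--     seen = {(current, carry): 0}
--     traj = [(current, carry)]
--     steps = 0
--     s = (current, carry)
--     while steps < n:
--         nd = multiplier * s[0] + s[1]
--         s = (nd % 10, nd // 10)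
--         steps += 1
--         if s in seen:
--             i = seen[s]
--             period = steps - i
--             s = traj[i + (n - i) % period]
--             break
--         seen[s] = steps
--         traj.append(s)
--     current, carry = s
--     first_digit = multiplier * current + carry
--     if current == 0 or first_digit != last_digit:
--         return 0
--     return result
-- ===== Notes on version B (the rewrite author's own statement) =====
-- stated objective: alternative
-- what changed: Instead of iterating all num_digits-1 steps, B accumulates the result only during the first steps while shift < modulo and then jumps over the remaining iterations using cycle detection on the (current, carry) state.
import Mathlib
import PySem

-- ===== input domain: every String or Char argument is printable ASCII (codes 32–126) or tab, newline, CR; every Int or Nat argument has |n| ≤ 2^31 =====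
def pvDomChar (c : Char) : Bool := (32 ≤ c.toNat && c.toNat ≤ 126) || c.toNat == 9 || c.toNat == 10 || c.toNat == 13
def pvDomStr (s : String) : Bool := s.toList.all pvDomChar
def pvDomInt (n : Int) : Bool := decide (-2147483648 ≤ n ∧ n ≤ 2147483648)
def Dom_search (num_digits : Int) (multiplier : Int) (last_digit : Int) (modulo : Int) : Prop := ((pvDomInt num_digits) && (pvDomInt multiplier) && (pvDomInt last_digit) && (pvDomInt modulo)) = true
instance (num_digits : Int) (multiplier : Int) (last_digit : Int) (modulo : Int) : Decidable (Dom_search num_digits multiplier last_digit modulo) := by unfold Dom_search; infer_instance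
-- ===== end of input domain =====

-- B accumulates the result only during the steps with shift < modulo and jumps over the
-- remaining iterations by cycle detection on the (current, carry) state.

-- ===== PORT A =====
-- the while-loop of A: state (num_digits, shift, carry, current, result)
def searchLoopA (multiplier modulo : Int) (num_digits shift carry current result : Int) :
    Int × Int × Int :=
  if h : num_digits > 1 then
    let next_digit := multiplier * current + carry
    let carry' := PySem.Int.floordiv next_digit 10
    let current' := PySem.Int.mod next_digit 10
    if shift < modulo then
      searchLoopA multiplier modulo (num_digits - 1) (shift * 10) carry' current'
        (result + current' * shift)
    else
      searchLoopA multiplier modulo (num_digits - 1) shift carry' current' result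
  else (current, carry, result)
termination_by num_digits.toNat
decreasing_by all_goals omega

def search (num_digits : Int) (multiplier : Int) (last_digit : Int) (modulo : Int) : Int :=
  let r := searchLoopA multiplier modulo num_digits 10 0 last_digit last_digit
  let current := r.1
  let carry := r.2.1
  let result := r.2.2
  let first_digit := multiplier * current + carry
  if current = 0 ∨ first_digit ≠ last_digit then 0 else result

-- ===== PORT B =====
-- phase 1 of B: accumulate while n > 0 and shift < modulo; returns (n, carry, current, result)
def searchAltPhase1 (multiplier modulo : Int) (n shift carry current result : Int) :
    Int × Int × Int × Int :=
  if h : n > 0 ∧ shift < modulo then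
    let nd := multiplier * current + carry
    let carry' := PySem.Int.floordiv nd 10
    let current' := PySem.Int.mod nd 10
    searchAltPhase1 multiplier modulo (n - 1) (shift * 10) carry' current'
      (result + current' * shift)
  else (n, carry, current, result)
termination_by n.toNat
decreasing_by omega

-- phase 2 of B: iterate the state, jumping ahead once a repeated state is seen
def searchAltPhase2 (multiplier n : Int) (seen : PySem.Dict (Int × Int) Int)
    (traj : List (Int × Int)) (steps : Int) (s : Int × Int) : Int × Int :=
  if h : steps < n then
    let nd := multiplier * s.1 + s.2
    let s' : Int × Int := (PySem.Int.mod nd 10, PySem.Int.floordiv nd 10)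
    let steps' := steps + 1
    match seen.get? s' with
    | some i =>
        let period := steps' - i
        -- Python's traj[...] : the index is provably in range, the default is never used
        (PySem.List.pyGet? traj (i + PySem.Int.mod (n - i) period)).getD s'
    | none => searchAltPhase2 multiplier n (seen.insert s' steps') (traj ++ [s']) steps' s'
  else s
termination_by (n - steps).toNat
decreasing_by omega

def search_alt (num_digits : Int) (multiplier : Int) (last_digit : Int) (modulo : Int) : Int :=
  let p := searchAltPhase1 multiplier modulo (num_digits - 1) 10 0 last_digit last_digit
  let n := p.1
  let carry := p.2.1
  let current := p.2.2.1
  let result := p.2.2.2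
  let s := searchAltPhase2 multiplier n (PySem.Dict.ofList [((current, carry), 0)])
    [(current, carry)] 0 (current, carry)
  let first_digit := multiplier * s.1 + s.2
  if s.1 = 0 ∨ first_digit ≠ last_digit then 0 else result

-- ===== PRECONDITION & SPEC =====
def Spec_search (num_digits : Int) (multiplier : Int) (last_digit : Int) (modulo : Int) (out : Int) : Prop := out = search_alt num_digits multiplier last_digit modulo
instance (num_digits : Int) (multiplier : Int) (last_digit : Int) (modulo : Int) (out : Int) : Decidable (Spec_search num_digits multiplier last_digit modulo out) := by unfold Spec_search; infer_instance

-- ===== CLAIM (what is proved, stated in full; the proofs are below) =====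
def Claim_equal_search : Prop := ∀ (num_digits : Int) (multiplier : Int) (last_digit : Int) (modulo : Int), Dom_search num_digits multiplier last_digit modulo → Spec_search num_digits multiplier last_digit modulo (search num_digits multiplier last_digit modulo)

-- ===== LEMMAS AND PROOFS =====

-- the pure (current, carry) step both loops perform
def pvStep (m : Int) (s : Int × Int) : Int × Int :=
  (PySem.Int.mod (m * s.1 + s.2) 10, PySem.Int.floordiv (m * s.1 + s.2) 10)

-- once shift ≥ modulo, A's loop is pure state iteration and result is unchanged
theorem searchLoopA_pure (m md : Int) (nd shift carry current result : Int)
    (hsh : ¬ shift < md) :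
    searchLoopA m md nd shift carry current result =
      (((pvStep m)^[(nd - 1).toNat] (current, carry)).1,
       ((pvStep m)^[(nd - 1).toNat] (current, carry)).2, result) := by
  fun_induction searchLoopA m md nd shift carry current result with
  | case1 nd shift carry current result h nd' c' cur' hlt ih =>
    exact absurd hlt hsh
  | case2 nd shift carry current result h nd' c' cur' hlt ih =>
    rw [ih hsh]
    have e : (nd - 1).toNat = (nd - 1 - 1).toNat + 1 := by omega
    rw [e, Function.iterate_succ_apply]
    rfl
  | case3 nd shift carry current result h =>
    have e : (nd - 1).toNat = 0 := by omega
    rw [e]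
    rfl

-- A's loop = B's phase 1 followed by pure iteration of the remaining steps
theorem searchLoopA_eq_phase1 (m md : Int) (nd shift carry current result : Int) :
    searchLoopA m md nd shift carry current result =
      (let q := searchAltPhase1 m md (nd - 1) shift carry current result
       (((pvStep m)^[q.1.toNat] (q.2.2.1, q.2.1)).1,
        ((pvStep m)^[q.1.toNat] (q.2.2.1, q.2.1)).2, q.2.2.2)) := by
  fun_induction searchLoopA m md nd shift carry current result with
  | case1 nd shift carry current result h nd' c' cur' hlt ih =>
    rw [ih]
    have : searchAltPhase1 m md (nd - 1) shift carry current result =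
        searchAltPhase1 m md (nd - 1 - 1) (shift * 10) c' cur' (result + cur' * shift) := by
      rw [searchAltPhase1]
      simp only [dif_pos (show nd - 1 > 0 ∧ shift < md by omega)]
      rfl
    rw [this]
  | case2 nd shift carry current result h nd' c' cur' hlt ih =>
    rw [searchLoopA_pure m md (nd - 1) shift c' cur' result hlt]
    have hq : searchAltPhase1 m md (nd - 1) shift carry current result =
        (nd - 1, carry, current, result) := by
      rw [searchAltPhase1]
      simp only [dif_neg (show ¬(nd - 1 > 0 ∧ shift < md) by tauto)]
    rw [hq]
    simp only
    rw [show (nd - 1).toNat = (nd - 1 - 1).toNat + 1 by omega, Function.iterate_succ_apply]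
    rfl
  | case3 nd shift carry current result h =>
    have hq : searchAltPhase1 m md (nd - 1) shift carry current result =
        (nd - 1, carry, current, result) := by
      rw [searchAltPhase1]
      simp only [dif_neg (show ¬(nd - 1 > 0 ∧ shift < md) by omega)]
    rw [hq]
    simp only
    rw [show (nd - 1).toNat = 0 by omega]
    rfl

-- jumping along a detected cycle computes the exact iterate
theorem iterate_cycle {α : Type} (f : α → α) (s0 : α) (i p : ℕ) (hp : 0 < p)
    (hcyc : f^[i + p] s0 = f^[i] s0) : ∀ n, i ≤ n →
    f^[n] s0 = f^[i + (n - i) % p] s0 := by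
  intro n
  induction n using Nat.strong_induction_on with
  | _ n IH =>
    intro hin
    by_cases hbig : i + p ≤ n
    · have h1 : f^[n] s0 = f^[n - p] s0 := by
        calc f^[n] s0 = f^[(n - p - i) + (i + p)] s0 := by
              rw [show (n - p - i) + (i + p) = n by omega]
          _ = f^[n - p - i] (f^[i + p] s0) := Function.iterate_add_apply f _ _ s0
          _ = f^[n - p - i] (f^[i] s0) := by rw [hcyc]
          _ = f^[(n - p - i) + i] s0 := (Function.iterate_add_apply f _ _ s0).symm
          _ = f^[n - p] s0 := by rw [show (n - p - i) + i = n - p by omega]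
      have h2 := IH (n - p) (by omega) (by omega)
      have e3 : (n - i) % p = (n - p - i) % p := by
        rw [show n - i = (n - p - i) + p by omega, Nat.add_mod_right]
      rw [h1, h2, e3]
    · have h : (n - i) % p = n - i := Nat.mod_eq_of_lt (by omega)
      rw [h, show i + (n - i) = n by omega]

-- phase 2 of B computes the n-th iterate of the (current, carry) state
theorem searchAltPhase2_eq (m n : Int) (s0 : Int × Int) :
    ∀ (k : ℕ) (steps : Int) (seen : PySem.Dict (Int × Int) Int) (traj : List (Int × Int))
      (s : Int × Int), (n - steps).toNat = k → 0 ≤ steps → steps ≤ n →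
      s = (pvStep m)^[steps.toNat] s0 →
      traj = (List.range (steps.toNat + 1)).map (fun j => (pvStep m)^[j] s0) →
      (∀ q i, seen.get? q = some i → 0 ≤ i ∧ i ≤ steps ∧ (pvStep m)^[i.toNat] s0 = q) →
      searchAltPhase2 m n seen traj steps s = (pvStep m)^[n.toNat] s0 := by
  intro k
  induction k using Nat.strong_induction_on with
  | _ k IH =>
    intro steps seen traj s hk h0 hn hs ht hseen
    rw [searchAltPhase2]
    by_cases hlt : steps < n
    · rw [dif_pos hlt]
      have hs' : (PySem.Int.mod (m * s.1 + s.2) 10, PySem.Int.floordiv (m * s.1 + s.2) 10) =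
          (pvStep m)^[steps.toNat + 1] s0 := by
        rw [Function.iterate_succ_apply', ← hs]; rfl
      cases hget : seen.get? (PySem.Int.mod (m * s.1 + s.2) 10, PySem.Int.floordiv (m * s.1 + s.2) 10) with
      | some i =>
        simp only [hget]
        obtain ⟨hi0, hile, hiter⟩ := hseen _ i hget
        have hp : 0 < steps.toNat + 1 - i.toNat := by omega
        have hcyc : (pvStep m)^[i.toNat + (steps.toNat + 1 - i.toNat)] s0 = (pvStep m)^[i.toNat] s0 := by
          rw [show i.toNat + (steps.toNat + 1 - i.toNat) = steps.toNat + 1 by omega, ← hs', hiter]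
        have hc := iterate_cycle (pvStep m) s0 i.toNat (steps.toNat + 1 - i.toNat) hp hcyc n.toNat (by omega)
        have hmodlt := Nat.mod_lt (n.toNat - i.toNat) hp
        have hidx : i + PySem.Int.mod (n - i) (steps + 1 - i) =
            ((i.toNat + (n.toNat - i.toNat) % (steps.toNat + 1 - i.toNat) : ℕ) : Int) := by
          rw [PySem.Int.mod_eq_emod_of_pos (by omega),
            show n - i = ((n.toNat - i.toNat : ℕ) : Int) by omega,
            show steps + 1 - i = ((steps.toNat + 1 - i.toNat : ℕ) : Int) by omega,
            ← Int.natCast_emod]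
          push_cast
          omega
        rw [hidx, PySem.List.pyGet?_natCast, ht]
        rw [List.getElem?_map, List.getElem?_range (by omega)]
        simp only [Option.map_some, Option.getD_some]
        exact hc.symm
      | none =>
        simp only [hget]
        apply IH ((n - (steps + 1)).toNat) (by omega) (steps + 1) _ _ _ rfl (by omega) (by omega)
        · rw [show (steps + 1).toNat = steps.toNat + 1 by omega]; exact hs'
        · rw [show (steps + 1).toNat = steps.toNat + 1 by omega, List.range_succ, List.map_append,
            ht, hs']
          rfl
        · intro q i hq
          rw [PySem.Dict.get?_insert] at hq
          split_ifs at hq with heq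
          · cases hq
            exact ⟨by omega, le_refl _, by
              rw [heq, show (steps + 1).toNat = steps.toNat + 1 by omega]; exact hs'.symm⟩
          · obtain ⟨a, b, c⟩ := hseen q i hq
            exact ⟨a, by omega, c⟩
    · rw [dif_neg hlt]
      have : steps = n := by omega
      rw [hs, this]

-- ===== VERDICT (by name: the statement is the Claim_ definition above) =====
theorem search_spec : Claim_equal_search := by
  intro nd m ld md _hdom
  unfold Spec_search search search_alt
  rw [searchLoopA_eq_phase1]
  set q := searchAltPhase1 m md (nd - 1) 10 0 ld ld with hq
  have hphase2 : searchAltPhase2 m q.1 (PySem.Dict.ofList [((q.2.2.1, q.2.1), 0)])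
      [(q.2.2.1, q.2.1)] 0 (q.2.2.1, q.2.1) = (pvStep m)^[q.1.toNat] (q.2.2.1, q.2.1) := by
    by_cases h : 0 < q.1
    · apply searchAltPhase2_eq m q.1 (q.2.2.1, q.2.1) q.1.toNat 0 _ _ _ (by omega) le_rfl
        (by omega) rfl (by simp)
      intro qq i hqq
      rw [show PySem.Dict.ofList [((q.2.2.1, q.2.1), 0)] = PySem.Dict.mk [((q.2.2.1, q.2.1), (0 : Int))] from rfl,
        PySem.Dict.get?_mk_cons] at hqq
      split_ifs at hqq with heq
      · cases hqq
        refine ⟨le_refl 0, le_refl 0, ?_⟩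
        simpa using (eq_of_beq heq)
      · simp [show PySem.Dict.mk ([] : List ((Int × Int) × Int)) = PySem.Dict.empty from rfl,
          PySem.Dict.get?_empty] at hqq
    · rw [searchAltPhase2, dif_neg (by omega)]
      rw [show q.1.toNat = 0 by omega]
      rfl
  simp only [hphase2]
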